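-- pv_equiv track=rewrite | github.com/pypeaday/aoc-2021 | src/day7.py | find_min
-- ===== SOURCE A (Python) =====
-- from typing import List, Tuple
--
-- def find_min(data) -> Tuple[int, int]:
--     """find_min.
--
--     find the value in data such that the sum of distances from all points to a given
--     point is minimized
--
--     Args:
--         data:
--
--     Returns:
--         min_position
--         min_fuel
--     """
--     min_position = -1
--     min_fuel = sum([abs(data[0] - j) for j in data if data[0] != j])
--
--     for i in data[1:]:
--         fuel = sum([abs(i - j) for j in data if i != j])
--         if fuel < min_fuel:
--             min_fuel = fuel
--             min_position = i
--
--     return min_position, min_fuel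
-- ===== SOURCE B (Python) =====
-- from typing import List, Tuple
--
-- def find_min(data) -> Tuple[int, int]:
--     # Sort + prefix sums: each candidate's total distance comes in O(1) from a
--     # precomputed table keyed by value, so the whole run is O(n log n) instead
--     # of A's O(n^2).  Selection over the candidates is unchanged from A's
--     # contract: start from data[0]'s fuel, update on strict improvement.
--     s = sorted(data)
--     n = len(s)
--     total = sum(s)
--     fuel = {}
--     k = 0
--     psum = 0
--     for v in s:
--         k += 1
--         psum += v
--         fuel[v] = k * v - psum + (total - psum) - (n - k) * v
--     pos = -1
--     best = fuel[data[0]]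
--     for x in data[1:]:
--         f = fuel[x]
--         if f < best:
--             pos, best = x, f
--     return pos, best
-- ===== Notes on version B (the rewrite author's own statement) =====
-- stated objective: faster
-- what changed: A rescans the whole list to sum distances for every candidate (quadratic); B sorts once and builds a value->fuel table from prefix sums in one pass, so each candidate's total distance is a single O(1) lookup.
-- outside the precondition, e.g. on find_min([]): A returns (-1, 0), B raises IndexError
import Mathlib
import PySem

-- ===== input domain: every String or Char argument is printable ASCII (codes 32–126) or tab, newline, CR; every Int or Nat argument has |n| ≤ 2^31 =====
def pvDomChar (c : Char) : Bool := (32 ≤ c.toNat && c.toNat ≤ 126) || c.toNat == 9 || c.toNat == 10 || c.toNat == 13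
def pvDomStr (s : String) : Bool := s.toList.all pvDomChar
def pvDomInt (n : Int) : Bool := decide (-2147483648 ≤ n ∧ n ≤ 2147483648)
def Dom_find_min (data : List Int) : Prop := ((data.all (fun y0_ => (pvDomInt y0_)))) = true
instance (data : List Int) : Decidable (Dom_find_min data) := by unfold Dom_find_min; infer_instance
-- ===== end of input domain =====

-- B replaces A's quadratic per-candidate rescan with a sort + prefix-sums fuel table (O(n log n)); selection over candidates is unchanged.

-- ===== PORT A =====
def find_min (data : List Int) : Int × Int :=
  let d0 := data.headD 0    -- data[0]; Pre_ excludes the empty list, the only input reaching the default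
  let minFuel := ((data.filter (fun j => d0 != j)).map (fun j => |d0 - j|)).sum
  (data.drop 1).foldl (fun (st : Int × Int) i =>
      let fuel := ((data.filter (fun j => i != j)).map (fun j => |i - j|)).sum
      if fuel < st.2 then (i, fuel) else st)
    (-1, minFuel)

-- ===== PORT B =====
def find_min_alt (data : List Int) : Int × Int :=
  let s := PySem.List.sorted data (fun x => x) false
  let n : Int := s.length
  let total := s.sum
  let st := s.foldl (fun (st : Int × Int × PySem.Dict Int Int) v =>
      let k := st.1 + 1
      let psum := st.2.1 + v
      (k, psum, st.2.2.insert v (k * v - psum + (total - psum) - (n - k) * v)))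
    (0, 0, PySem.Dict.empty)
  let fuel := st.2.2
  -- fuel[x]: every looked-up x is in data, hence a key of the table, so Python's
  -- d[x] never raises here; getD is exact on these lookups.
  (data.drop 1).foldl (fun (acc : Int × Int) x =>
      let f := fuel.getD x 0
      if f < acc.2 then (x, f) else acc)
    (-1, fuel.getD (data.headD 0) 0)

-- ===== PRECONDITION & SPEC =====
-- Pre_ excludes exactly the empty list: there A's empty comprehension accidentally yields the sentinel position with zero fuel, while B (indexing data[0]) raises IndexError.
def Pre_find_min (data : List Int) : Prop := data ≠ []
instance (data : List Int) : Decidable (Pre_find_min data) := by unfold Pre_find_min; infer_instance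
def pvWitness_find_min : List Int := [1, 7, 2]
def Spec_find_min (data : List Int) (out : Int × Int) : Prop := out = find_min_alt data
instance (data : List Int) (out : Int × Int) : Decidable (Spec_find_min data out) := by unfold Spec_find_min; infer_instance

-- ===== CLAIM (what is proved, stated in full; the proofs are below) =====
def Claim_equal_find_min : Prop := ∀ (data : List Int), Dom_find_min data → Pre_find_min data → Spec_find_min data (find_min data)

-- ===== LEMMAS AND PROOFS =====

-- total |x - j| distance over a list
def fuelOf (x : Int) (l : List Int) : Int := (l.map (fun j => |x - j|)).sum

-- A's comprehension filter 'if i != j' only drops zero terms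
theorem filter_ne_fuel (x : Int) (l : List Int) :
    ((l.filter (fun j => x != j)).map (fun j => |x - j|)).sum = fuelOf x l := by
  induction l with
  | nil => rfl
  | cons a t ih =>
    by_cases h : x = a
    · simp [fuelOf, h, List.map_cons] at *
      simpa [h] using ih
    · simp [fuelOf, h, List.map_cons] at *
      omega

-- closed form: k*x - psum + (total - psum) - (n-k)*x = Σ |x - j|  (any list)
theorem fuel_formula (x : Int) (s : List Int) :
    ((s.countP (fun j => j ≤ x)) : Int) * x - (s.filter (fun j => j ≤ x)).sum
      + (s.sum - (s.filter (fun j => j ≤ x)).sum)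
      - ((s.length : Int) - (s.countP (fun j => j ≤ x))) * x = fuelOf x s := by
  induction s with
  | nil => simp [fuelOf]
  | cons a t ih =>
    by_cases h : a ≤ x
    · have habs : |x - a| = x - a := abs_of_nonneg (by omega)
      simp only [fuelOf, List.map_cons, List.sum_cons, List.countP_cons, List.filter_cons,
        List.length_cons, h, decide_true, if_pos] at *
      push_cast
      nlinarith [ih]
    · have habs : |x - a| = a - x := by rw [abs_sub_comm]; exact abs_of_nonneg (by omega)
      simp only [fuelOf, List.map_cons, List.sum_cons, List.countP_cons, List.filter_cons,
        List.length_cons, h, decide_false] at *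
      push_cast
      nlinarith [ih]

-- the dict-building step of B's first loop
def dstep (total n : Int) (st : Int × Int × PySem.Dict Int Int) (v : Int) :
    Int × Int × PySem.Dict Int Int :=
  let k := st.1 + 1
  let psum := st.2.1 + v
  (k, psum, st.2.2.insert v (k * v - psum + (total - psum) - (n - k) * v))

-- keys not inserted during the loop keep their binding
theorem dict_untouched (T N : Int) (l : List Int) :
    ∀ (st : Int × Int × PySem.Dict Int Int) (y : Int), y ∉ l →
      ((l.foldl (dstep T N) st).2.2).getD y 0 = st.2.2.getD y 0 := by
  induction l with
  | nil => intro st y _; rfl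
  | cons v t ih =>
    intro st y hy
    simp only [List.foldl_cons]
    rw [ih _ y (by simp at hy; exact hy.2)]
    simp only [dstep]
    rw [PySem.Dict.getD_insert]
    simp at hy
    simp [hy.1]

-- invariant of B's first loop over the SORTED list: the final binding of x is
-- computed from the count/sum of elements ≤ x
theorem dict_fold_getD (T N : Int) :
    ∀ (s : List Int), s.Pairwise (· ≤ ·) →
      ∀ (k0 p0 : Int) (d : PySem.Dict Int Int) (x : Int), x ∈ s →
        ((s.foldl (dstep T N) (k0, p0, d)).2.2).getD x 0 =
          (k0 + (s.countP (fun j => j ≤ x))) * x - (p0 + (s.filter (fun j => j ≤ x)).sum)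
            + (T - (p0 + (s.filter (fun j => j ≤ x)).sum))
            - (N - (k0 + (s.countP (fun j => j ≤ x)))) * x := by
  intro s
  induction s with
  | nil => intro _ _ _ _ x hx; cases hx
  | cons v t ih =>
    intro hp k0 p0 d x hx
    have hv : ∀ b ∈ t, v ≤ b := (List.pairwise_cons.mp hp).1
    have ht : t.Pairwise (· ≤ ·) := (List.pairwise_cons.mp hp).2
    simp only [List.foldl_cons]
    by_cases hxt : x ∈ t
    · have hvx : v ≤ x := hv x hxt
      rw [show dstep T N (k0, p0, d) v = (k0 + 1, p0 + v,
            d.insert v ((k0+1) * v - (p0+v) + (T - (p0+v)) - (N - (k0+1)) * v)) from rfl]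
      rw [ih ht (k0 + 1) (p0 + v) _ x hxt]
      simp only [List.countP_cons, List.filter_cons, hvx, decide_true, if_pos, List.sum_cons]
      push_cast
      ring
    · have hxv : x = v := (List.mem_cons.mp hx).resolve_right hxt
      subst hxv
      rw [show dstep T N (k0, p0, d) x = (k0 + 1, p0 + x,
            d.insert x ((k0+1) * x - (p0+x) + (T - (p0+x)) - (N - (k0+1)) * x)) from rfl]
      rw [dict_untouched T N t _ x hxt, PySem.Dict.getD_insert_self]
      have hc : t.countP (fun j => j ≤ x) = 0 := by
        rw [List.countP_eq_zero]
        intro j hj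
        have h1 : x ≤ j := hv j hj
        have h2 : j ≠ x := fun he => hxt (he ▸ hj)
        simp; omega
      have hf : t.filter (fun j => j ≤ x) = [] := by
        rw [List.filter_eq_nil_iff]
        intro j hj
        have h1 : x ≤ j := hv j hj
        have h2 : j ≠ x := fun he => hxt (he ▸ hj)
        simp; omega
      simp only [List.countP_cons, List.filter_cons, le_refl, decide_true, if_pos,
        List.sum_cons, hc, hf, List.sum_nil]
      push_cast
      ring

-- B's fuel table agrees with the naive total-distance sum on every element of data
theorem lookup_eq_fuelOf (data : List Int) (x : Int) (hx : x ∈ data) :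
    (((PySem.List.sorted data (fun x => x) false).foldl
        (dstep (PySem.List.sorted data (fun x => x) false).sum
               ((PySem.List.sorted data (fun x => x) false).length))
        (0, 0, PySem.Dict.empty)).2.2).getD x 0 = fuelOf x data := by
  set s := PySem.List.sorted data (fun x => x) false with hs
  have hperm : s.Perm data := PySem.List.sorted_perm data (fun x => x) false
  have hpw : s.Pairwise (· ≤ ·) := by
    have := PySem.List.sorted_pairwise data (fun x => x)
    simpa [hs] using this
  have hxs : x ∈ s := hperm.mem_iff.mpr hx
  rw [dict_fold_getD s.sum (s.length) s hpw 0 0 PySem.Dict.empty x hxs]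
  have := fuel_formula x s
  have hfs : fuelOf x s = fuelOf x data := (hperm.map (fun j => |x - j|)).sum_eq
  rw [← hfs, ← this]
  ring

-- ===== VERDICT (by name: the statement is the Claim_ definition above) =====
theorem find_min_spec : Claim_equal_find_min := by
  intro data _ hpre
  unfold Spec_find_min
  simp only [find_min, find_min_alt]
  have hd0 : data.headD 0 ∈ data := by
    cases data with
    | nil => exact absurd rfl hpre
    | cons a t => simp
  have hinit : (((PySem.List.sorted data (fun x => x) false).foldl
        (dstep (PySem.List.sorted data (fun x => x) false).sum
               ((PySem.List.sorted data (fun x => x) false).length))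
        (0, 0, PySem.Dict.empty)).2.2).getD (data.headD 0) 0 =
      ((data.filter (fun j => data.headD 0 != j)).map (fun j => |data.headD 0 - j|)).sum := by
    rw [lookup_eq_fuelOf data _ hd0, filter_ne_fuel]
  rw [show (fun (st : Int × Int × PySem.Dict Int Int) v =>
        (st.1 + 1, st.2.1 + v, st.2.2.insert v ((st.1+1) * v - (st.2.1+v)
          + ((PySem.List.sorted data (fun x => x) false).sum - (st.2.1+v))
          - (((PySem.List.sorted data (fun x => x) false).length : Int) - (st.1+1)) * v)))
      = dstep (PySem.List.sorted data (fun x => x) false).sum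
              ((PySem.List.sorted data (fun x => x) false).length) from rfl]
  rw [hinit]
  refine PySem.List.foldl_congr_mem _ _ _ _ ?_
  intro acc x hx
  have hxd : x ∈ data := List.mem_of_mem_drop hx
  rw [lookup_eq_fuelOf data x hxd, filter_ne_fuel]
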